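-- pv_equiv track=rewrite | github.com/agilesparks/UnitTests-TDD-Refactor-Workshop | python/LegacyPlayground/Production/UnInstantiableClass.py | methodA
-- ===== SOURCE A (Python) =====
-- def methodA(myParam):
--     sum = 0
--     if (myParam < 1):
--         sum = 10
--     for i in range(myParam * myParam):
--         if (i < myParam + 50):
--             sum = sum + i
--         else:
--             sum = sum + myParam
--     return sum
-- ===== SOURCE B (Python) =====
-- def methodA(myParam):
--     n = myParam * myParam
--     t = min(max(myParam + 50, 0), n)
--     base = 10 if myParam < 1 else 0
--     return base + t * (t - 1) // 2 + (n - t) * myParam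
-- ===== Notes on version B (the rewrite author's own statement) =====
-- stated objective: faster
-- what changed: Replaced the O(myParam^2) accumulation loop with a closed-form formula: clamp the threshold t = min(max(myParam+50,0), myParam^2), add t(t-1)/2 for the indices below the threshold and (myParam^2 - t)*myParam for the rest.
import Mathlib
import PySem

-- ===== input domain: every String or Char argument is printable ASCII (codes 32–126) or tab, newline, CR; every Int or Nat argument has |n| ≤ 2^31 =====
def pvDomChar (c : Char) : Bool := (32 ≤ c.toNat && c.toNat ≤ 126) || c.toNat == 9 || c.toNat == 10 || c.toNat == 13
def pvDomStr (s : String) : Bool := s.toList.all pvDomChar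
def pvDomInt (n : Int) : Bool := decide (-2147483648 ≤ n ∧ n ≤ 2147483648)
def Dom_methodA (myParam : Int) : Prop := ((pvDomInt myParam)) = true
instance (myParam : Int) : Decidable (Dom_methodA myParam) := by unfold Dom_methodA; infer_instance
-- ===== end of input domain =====

-- B replaces A's O(myParam^2) accumulation loop with a closed-form arithmetic formula (objective: faster, asymptotic).

-- ===== PORT A =====
def methodA (myParam : Int) : Int :=
  let sum : Int := if myParam < 1 then 10 else 0
  (PySem.List.pyRange 0 (myParam * myParam) 1).foldl
    (fun s i => if i < myParam + 50 then s + i else s + myParam) sum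

-- ===== PORT B =====
def methodA_alt (myParam : Int) : Int :=
  let n := myParam * myParam
  let t := min (max (myParam + 50) 0) n
  let base : Int := if myParam < 1 then 10 else 0
  base + PySem.Int.floordiv (t * (t - 1)) 2 + (n - t) * myParam

-- ===== PRECONDITION & SPEC =====
def Spec_methodA (myParam : Int) (out : Int) : Prop := out = methodA_alt myParam
instance (myParam : Int) (out : Int) : Decidable (Spec_methodA myParam out) := by unfold Spec_methodA; infer_instance

-- ===== CLAIM (what is proved, stated in full; the proofs are below) =====
def Claim_equal_methodA : Prop := ∀ (myParam : Int), Dom_methodA myParam → Spec_methodA myParam (methodA myParam)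

-- ===== LEMMAS AND PROOFS =====

-- t*(t-1) is even, so the Python floor division // 2 is exact halving
theorem half_mul_pred (t : Int) : PySem.Int.floordiv (t * (t - 1)) 2 * 2 = t * (t - 1) := by
  have h : Even (t * (t - 1)) := by
    rcases Int.even_or_odd t with h | h
    · exact h.mul_right _
    · have h2 : Even (t - 1) := Odd.sub_odd h odd_one
      exact h2.mul_left _
  obtain ⟨b, hb⟩ := h
  have hb2 : t * (t - 1) = 2 * b := by omega
  rw [hb2, PySem.Int.floordiv_eq_ediv_of_pos (by norm_num)]
  omega

-- loop invariant: the fold over pyRange 0 n 1 equals the closed form, for any 0 ≤ n ≤ myParam^2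
theorem loop_closed (m : Int) : ∀ (k : Nat) (s : Int),
    (PySem.List.pyRange 0 (k : Int) 1).foldl
      (fun s i => if i < m + 50 then s + i else s + m) s
    = s + PySem.Int.floordiv (min (max (m + 50) 0) k * (min (max (m + 50) 0) k - 1)) 2
        + ((k : Int) - min (max (m + 50) 0) k) * m := by
  intro k
  induction k with
  | zero =>
    intro s
    simp only [Nat.cast_zero]
    rw [PySem.List.pyRange_one_eq_nil (le_refl 0)]
    have h0 : min (max (m + 50) 0) (0:Int) = 0 := by omega
    rw [h0, PySem.Int.floordiv_eq_ediv_of_pos (by norm_num)]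
    norm_num
  | succ k ih =>
    intro s
    have hk : ((k : Int) : Int) ≤ (k : Int) + 1 := by omega
    have hcast : ((k + 1 : Nat) : Int) = (k : Int) + 1 := by push_cast; ring
    rw [hcast, PySem.List.pyRange_one_succ_right (by positivity), List.foldl_append, ih]
    simp only [List.foldl]
    have e1 := half_mul_pred (min (max (m + 50) 0) (k : Int))
    have e2 := half_mul_pred (min (max (m + 50) 0) ((k : Int) + 1))
    by_cases h : (k : Int) < m + 50
    · rw [if_pos h]
      have ht1 : min (max (m + 50) 0) ((k : Int) + 1) = (k : Int) + 1 := by omega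
      have ht0 : min (max (m + 50) 0) (k : Int) = (k : Int) := by omega
      rw [ht1] at e2; rw [ht0] at e1
      rw [ht1, ht0]
      nlinarith [e1, e2]
    · rw [if_neg h]
      have ht1 : min (max (m + 50) 0) ((k : Int) + 1) = max (m + 50) 0 := by omega
      have ht0 : min (max (m + 50) 0) (k : Int) = max (m + 50) 0 := by omega
      rw [ht1, ht0]; ring

-- ===== VERDICT (by name: the statement is the Claim_ definition above) =====
theorem methodA_spec : Claim_equal_methodA := by
  intro m _
  unfold Spec_methodA methodA methodA_alt
  have hsq : (0:Int) ≤ m * m := mul_self_nonneg m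
  have hcast : m * m = ((m * m).toNat : Int) := by omega
  simp only []
  rw [hcast, loop_closed m (m * m).toNat]
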